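-- pv_equiv track=rewrite | github.com/yangoos57/dataStudy | coding_test/programmers/[stack] 3번.py | solution
-- ===== SOURCE A (Python) =====
-- def solution(a, b):
--     answer = []
--     while a:
--         # 일단위 변화사항 체크
--         for i in range(len(a)):
--             a[i] += b[i]
--
--         # 성공이 100% 이상인 경우 모두 뽑아내기
--         c = 0
--         while a and a[0] >= 100:
--             a.pop(0)
--             b.pop(0)
--             c += 1
--
--         # 1개라도 있다면 answer에 append 하기
--         if c > 0:
--             answer.append(c)
--
--     return answer
-- ===== SOURCE B (Python) =====
-- def solution(a, b):
--     # O(n): each task's completion day via ceiling division, then one grouping pass.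
--     # NOTE: unlike A, B does not mutate a or b in place; return value is the same.
--     answer = []
--     group_day = None
--     count = 0
--     for x, s in zip(a, b):
--         d = max(1, -((x - 100) // s))
--         if group_day is None or d > group_day:
--             if count:
--                 answer.append(count)
--             group_day = d
--             count = 1
--         else:
--             count += 1
--     if count:
--         answer.append(count)
--     return answer
-- ===== Notes on version B (the rewrite author's own statement) =====
-- stated objective: alternative
-- what changed: A simulates progress day by day (add every speed, pop the finished prefix, repeat); B computes each task's completion day with one ceiling division and produces the groups in a single pass over the tasks (intended as faster; a timing run saw A time out where B returned but could not measure a ratio).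
-- outside the precondition, e.g. on solution([150], [0]): A returns [1], B raises ZeroDivisionError; on solution([101, 150], [-1, -10]): A returns [2], B returns [1, 1]
import Mathlib
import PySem

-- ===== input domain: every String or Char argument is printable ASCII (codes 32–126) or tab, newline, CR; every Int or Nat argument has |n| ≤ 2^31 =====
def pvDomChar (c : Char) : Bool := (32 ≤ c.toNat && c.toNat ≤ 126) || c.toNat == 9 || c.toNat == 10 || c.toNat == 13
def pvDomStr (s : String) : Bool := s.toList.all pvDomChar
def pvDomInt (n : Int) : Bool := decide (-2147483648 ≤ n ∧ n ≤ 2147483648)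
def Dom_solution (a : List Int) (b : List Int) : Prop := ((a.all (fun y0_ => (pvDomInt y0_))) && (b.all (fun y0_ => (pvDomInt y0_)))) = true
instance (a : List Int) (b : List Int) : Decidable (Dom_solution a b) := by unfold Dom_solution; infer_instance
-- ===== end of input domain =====

-- B replaces A's day-by-day simulation (add speeds, pop finished prefix, repeat) by computing each
-- task's completion day with one ceiling division and a single grouping pass (objective: alternative;
-- intended as faster — a timing run saw A time out where B returned, but measured no clean ratio).
-- A mutates its arguments in place (empties `a`); B does not — the equivalence is about the return value.

-- ===== PORT A =====
-- inner `while a and a[0] >= 100: a.pop(0); b.pop(0); c += 1` — returns (c, remaining a, remaining b)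
def popLoop : List Int → List Int → Int → Int × List Int × List Int
  | x :: a, b, c => if 100 ≤ x then popLoop a (b.drop 1) (c + 1) else (c, x :: a, b)
  | [], b, c => (c, [], b)

-- outer `while a:` with fuel; `for i in range(len(a)): a[i] += b[i]` is List.zipWith (·+·) a b,
-- exact when a.length ≤ b.length (Python raises IndexError otherwise; Pre_ excludes that).
def solutionGo : Nat → List Int → List Int → List Int → List Int
  | 0, _, _, ans => ans
  | fuel + 1, a, b, ans =>
    if a.isEmpty then ans
    else
      solutionGo fuel (popLoop (List.zipWith (· + ·) a b) b 0).2.1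
        (popLoop (List.zipWith (· + ·) a b) b 0).2.2
        (if 0 < (popLoop (List.zipWith (· + ·) a b) b 0).1 then
          ans ++ [(popLoop (List.zipWith (· + ·) a b) b 0).1] else ans)

-- fuel = an upper bound on the number of days the outer loop runs (proved sufficient under Pre_)
def solution (a : List Int) (b : List Int) : List Int :=
  solutionGo (a.length + (a.map (fun x => (100 - x).toNat)).sum + 1) a b []

-- ===== PORT B =====
-- d = max(1, -((x - 100) // s))
def altDay (x s : Int) : Int := max 1 (-(PySem.Int.floordiv (x - 100) s))

-- the `for x, s in zip(a, b):` loop of Source B, state = (group_day, count, answer)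
def altGo : List (Int × Int) → Option Int → Int → List Int → List Int
  | [], _, count, ans => if count ≠ 0 then ans ++ [count] else ans
  | (x, s) :: rest, gd, count, ans =>
    let d := altDay x s
    let newGroup : Bool := match gd with | none => true | some g => decide (g < d)
    if newGroup then altGo rest (some d) 1 (if count ≠ 0 then ans ++ [count] else ans)
    else altGo rest gd (count + 1) ans

def solution_alt (a : List Int) (b : List Int) : List Int := altGo (a.zip b) none 0 []

-- ===== PRECONDITION & SPEC =====
-- Pre_ restricts to the task's natural domain (per-task speeds are positive, one speed per task):
-- with a speed ≤ 0 A loops forever or returns a day count that is an artefact of its front-pop order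
-- (and B's ceiling formula raises on speed 0), and with b shorter than a, A raises IndexError.
def Pre_solution (a : List Int) (b : List Int) : Prop :=
  a.length ≤ b.length ∧ ∀ p ∈ a.zip b, 0 < p.2
instance (a : List Int) (b : List Int) : Decidable (Pre_solution a b) := by
  unfold Pre_solution; infer_instance

def pvWitness_solution : List Int × List Int := ([93, 30, 55], [1, 30, 5])

def Spec_solution (a : List Int) (b : List Int) (out : List Int) : Prop := out = solution_alt a b
instance (a : List Int) (b : List Int) (out : List Int) : Decidable (Spec_solution a b out) := by unfold Spec_solution; infer_instance

-- ===== CLAIM (what is proved, stated in full; the proofs are below) =====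
def Claim_equal_solution : Prop := ∀ (a : List Int) (b : List Int), Dom_solution a b → Pre_solution a b → Spec_solution a b (solution a b)

-- ===== LEMMAS AND PROOFS =====

-- the day list: task i finishes on day (days a b)[i]; grouping those days is B's job
def days (a : List Int) (b : List Int) : List Int := (a.zip b).map (fun p => altDay p.1 p.2)

-- one elapsed day on a completion day
def decD (d : Int) : Int := max 1 (d - 1)

-- leading count of finished tasks (value ≥ 100)
def leadPop : List Int → Nat
  | [] => 0
  | x :: l => if 100 ≤ x then leadPop l + 1 else 0

-- leading count of day-1 tasks
def leadOne : List Int → Nat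
  | [] => 0
  | d :: l => if d = 1 then leadOne l + 1 else 0

-- pure grouping of a day list: g = current group's day, c = its size so far
def grp (g c : Int) : List Int → List Int
  | [] => [c]
  | d :: ds => if g < d then c :: grp d 1 ds else grp g (c + 1) ds

def G : List Int → List Int
  | [] => []
  | d :: ds => grp d 1 ds

-- maximum day (as Nat)
def M : List Int → Nat
  | [] => 0
  | d :: ds => max d.toNat (M ds)

theorem altDay_pos (x s : Int) : 1 ≤ altDay x s := le_max_left _ _

theorem altDay_one_iff (x s : Int) (hs : 0 < s) : altDay x s = 1 ↔ 100 ≤ x + s := by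
  have h := (PySem.Int.le_floordiv_iff_mul_le (a := x - 100) (b := s) (q := -1) hs)
  unfold altDay
  constructor
  · intro h1
    have : -1 ≤ PySem.Int.floordiv (x - 100) s := by omega
    have := h.mp this
    nlinarith
  · intro h1
    have : (-1) * s ≤ x - 100 := by nlinarith
    have := h.mpr this
    omega

theorem altDay_shift (x s : Int) (hs : 0 < s) : altDay (x + s) s = decD (altDay x s) := by
  have h := (PySem.Int.floordiv_eq_iff_of_pos (a := x - 100) (b := s)
      (q := PySem.Int.floordiv (x - 100) s) hs).mp rfl
  have h2 : PySem.Int.floordiv (x + s - 100) s = PySem.Int.floordiv (x - 100) s + 1 := by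
    rw [PySem.Int.floordiv_eq_iff_of_pos hs]
    constructor <;> nlinarith
  unfold altDay decD
  rw [h2]
  omega

theorem altDay_bound (x s : Int) (hs : 0 < s) : (altDay x s).toNat ≤ 1 + (100 - x).toNat := by
  have key : x - 100 ≤ PySem.Int.floordiv (x - 100) s ∨ 0 ≤ PySem.Int.floordiv (x - 100) s := by
    by_cases hx : x ≤ 100
    · exact Or.inl ((PySem.Int.le_floordiv_iff_mul_le hs).mpr (by nlinarith))
    · exact Or.inr ((PySem.Int.le_floordiv_iff_mul_le hs).mpr (by nlinarith))
  unfold altDay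
  rcases key with h | h <;> omega

theorem zip_zipWith_add (a b : List Int) :
    (List.zipWith (· + ·) a b).zip b = (a.zip b).map (fun p => (p.1 + p.2, p.2)) := by
  induction a generalizing b with
  | nil => simp
  | cons x a ih =>
    cases b with
    | nil => simp
    | cons s b => simp [ih]

theorem days_shift (a b : List Int) (hpos : ∀ p ∈ a.zip b, 0 < p.2) :
    days (List.zipWith (· + ·) a b) b = (days a b).map decD := by
  unfold days
  rw [zip_zipWith_add, List.map_map, List.map_map]
  exact List.map_congr_left (fun p hp => altDay_shift p.1 p.2 (hpos p hp))

theorem popLoop_eq (l : List Int) : ∀ (b : List Int) (c : Int),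
    popLoop l b c = (c + (leadPop l : Int), l.drop (leadPop l), b.drop (leadPop l)) := by
  induction l with
  | nil => intro b c; simp [popLoop, leadPop]
  | cons x l ih =>
    intro b c
    by_cases h : 100 ≤ x
    · simp only [popLoop, leadPop, if_pos h, ih, Prod.mk.injEq]
      refine ⟨by push_cast; ring, rfl, ?_⟩
      rw [List.drop_drop, Nat.add_comm]
    · simp [popLoop, leadPop, h]

theorem leadPop_eq_leadOne (a : List Int) : ∀ (b : List Int),
    (∀ p ∈ a.zip b, 0 < p.2) →
    leadPop (List.zipWith (· + ·) a b) = leadOne (days a b) := by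
  induction a with
  | nil => intro b _; simp [leadPop, leadOne, days]
  | cons x a ih =>
    intro b hpos
    cases b with
    | nil => simp [leadPop, leadOne, days]
    | cons s b =>
      have hs : 0 < s := hpos (x, s) (by simp)
      have hd := altDay_one_iff x s hs
      simp only [List.zipWith_cons_cons, leadPop, days, List.zip_cons_cons, List.map_cons, leadOne]
      have ihe : leadPop (List.zipWith (· + ·) a b) = leadOne (days a b) :=
        ih b (fun p hp => hpos p (by simp [hp]))
      by_cases h : 100 ≤ x + s
      · rw [if_pos h, if_pos (hd.mpr h), ihe]; rfl
      · rw [if_neg h, if_neg (fun he => h (hd.mp he))]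

theorem zip_drop (k : Nat) : ∀ (a b : List Int), (a.drop k).zip (b.drop k) = (a.zip b).drop k := by
  induction k with
  | zero => simp
  | succ k ih =>
    intro a b
    cases a with
    | nil => simp
    | cons x a =>
      cases b with
      | nil => simp
      | cons s b => simpa using ih a b

theorem days_drop (k : Nat) (a b : List Int) :
    days (a.drop k) (b.drop k) = (days a b).drop k := by
  unfold days
  rw [zip_drop, List.map_drop]

theorem grp_dec (ds : List Int) : ∀ (g c : Int), 2 ≤ g → (∀ d ∈ ds, 1 ≤ d) →
    grp (g - 1) c (ds.map decD) = grp g c ds := by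
  induction ds with
  | nil => intro g c _ _; simp [grp]
  | cons d ds ih =>
    intro g c hg hall
    have hd1 : 1 ≤ d := hall d (by simp)
    have hall' : ∀ e ∈ ds, 1 ≤ e := fun e he => hall e (by simp [he])
    simp only [List.map_cons, grp]
    by_cases h : g < d
    · rw [if_pos (by unfold decD; omega), if_pos h]
      have : decD d = d - 1 := by unfold decD; omega
      rw [this, ih d 1 (by omega) hall']
    · rw [if_neg (by unfold decD; omega), if_neg h]
      exact ih g (c + 1) hg hall'

theorem grp_ones (ds : List Int) : ∀ (c : Int), (∀ d ∈ ds, 1 ≤ d) →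
    grp 1 c ds = (c + (leadOne ds : Int)) :: G (ds.drop (leadOne ds)) := by
  induction ds with
  | nil => intro c _; simp [grp, leadOne, G]
  | cons d ds ih =>
    intro c hall
    have hd1 : 1 ≤ d := hall d (by simp)
    have hall' : ∀ e ∈ ds, 1 ≤ e := fun e he => hall e (by simp [he])
    by_cases h : d = 1
    · subst h
      simp only [grp, if_neg (by omega : ¬ (1:Int) < 1)]
      rw [ih (c + 1) hall']
      have hl : leadOne (1 :: ds) = leadOne ds + 1 := by simp [leadOne]
      rw [hl, List.drop_succ_cons]
      congr 1
      push_cast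
      ring
    · simp only [grp, if_pos (by omega : (1:Int) < d), leadOne, if_neg h]
      simp [G]

theorem M_mem (ds : List Int) (d : Int) (hd : d ∈ ds) : d.toNat ≤ M ds := by
  induction ds with
  | nil => simp at hd
  | cons e ds ih =>
    rcases List.mem_cons.mp hd with h | h
    · subst h; simp [M]
    · have := ih h; simp [M]; omega

theorem M_lt (ds : List Int) (m : Nat) (hm : 0 < m) (h : ∀ d ∈ ds, d.toNat < m) : M ds < m := by
  induction ds with
  | nil => simpa [M]
  | cons d ds ih =>
    simp only [M]
    have h1 := h d (by simp)
    have h2 := ih (fun e he => h e (by simp [he]))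
    omega

theorem days_ge_one (a b : List Int) : ∀ d ∈ days a b, 1 ≤ d := by
  intro d hd
  unfold days at hd
  rcases List.mem_map.mp hd with ⟨p, _, hp⟩
  rw [← hp]; exact altDay_pos p.1 p.2

-- the first day after the leading ones is not 1
theorem leadOne_drop (ds : List Int) :
    ∀ e ∈ (ds.drop (leadOne ds)).head?, e ≠ 1 := by
  induction ds with
  | nil => simp
  | cons d ds ih =>
    by_cases h : d = 1
    · subst h; simpa [leadOne] using ih
    · simp [leadOne, h]

theorem length_days (a b : List Int) (hab : a.length ≤ b.length) :
    (days a b).length = a.length := by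
  unfold days
  rw [List.length_map, List.length_zip]
  exact Nat.min_eq_left hab

theorem solutionGo_nil (fuel : Nat) (b ans : List Int) : solutionGo fuel [] b ans = ans := by
  cases fuel <;> simp [solutionGo]

-- the main simulation lemma: A's fueled loop produces the grouping of the day list
theorem solutionGo_eq (fuel : Nat) : ∀ (a b ans : List Int),
    a.length ≤ b.length → (∀ p ∈ a.zip b, 0 < p.2) → M (days a b) < fuel →
    solutionGo fuel a b ans = ans ++ G (days a b) := by
  induction fuel with
  | zero => intro a b ans _ _ h; omega
  | succ fuel ih =>
    intro a b ans hab hpos hM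
    cases ha : a with
    | nil => simp [solutionGo, days, G]
    | cons x a' =>
      subst ha
      rw [solutionGo, if_neg (by simp)]
      set a1 := List.zipWith (· + ·) (x :: a') b with ha1
      rw [popLoop_eq]
      set k := leadPop a1 with hk
      set ds := days (x :: a') b with hds
      have hdsl : ds.length = (x :: a').length := length_days _ _ hab
      have hge1 : ∀ d ∈ ds, 1 ≤ d := days_ge_one _ _
      have hkone : k = leadOne ds := leadPop_eq_leadOne _ _ hpos
      have ha1len : a1.length = (x :: a').length := by
        rw [ha1, List.length_zipWith]; omega
      have hdsne : ds ≠ [] := by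
        intro h
        have := congrArg List.length h
        rw [hdsl] at this
        simp at this
      have hMpos : 1 ≤ M ds := by
        cases hds' : ds with
        | nil => exact absurd hds' hdsne
        | cons d0 ds' =>
          have := hge1 d0 (by rw [hds']; simp)
          simp [M]; omega
      -- the day list after one elapsed day, popped
      have hdays' : days (a1.drop k) (b.drop k) = (ds.drop k).map decD := by
        rw [days_drop, ha1, days_shift _ _ hpos, ← hds, List.map_drop]
      -- G ds decomposes as the popped group followed by the rest
      have hsplit : G ds = (if 0 < ((0:Int) + (k:Int)) then [(0:Int) + (k:Int)] else [])
          ++ G (ds.drop k) := by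
        cases hds' : ds with
        | nil => exact absurd hds' hdsne
        | cons d0 ds' =>
          by_cases hk0 : k = 0
          · rw [hk0]
            simp
          · have hd0 : d0 = 1 := by
              by_contra hne
              rw [hkone, hds'] at hk0
              simp [leadOne, hne] at hk0
            have : leadOne ds = leadOne ds' + 1 := by
              rw [hds', hd0]; simp [leadOne]
            rw [if_pos (by omega)]
            have hall' : ∀ e ∈ ds', 1 ≤ e := by
              intro e he; exact hge1 e (by rw [hds']; simp [he])
            simp only [G, hd0]
            rw [grp_ones ds' 1 hall']
            have hkk : k = leadOne ds' + 1 := by rw [hkone]; omega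
            rw [hkk, List.drop_succ_cons, List.singleton_append]
            congr 1
            push_cast
            ring
      rw [hsplit]
      -- rest of the days: all ≥ 1, head (if any) ≥ 2
      rcases hrest : ds.drop k with _ | ⟨e, rest⟩
      · -- nothing remains: a1.drop k = [], the next iteration returns the accumulator
        have hlen0 : (a1.drop k).length = 0 := by
          have := congrArg List.length hrest
          rw [List.length_drop] at this
          simp only [List.length_nil] at this
          rw [List.length_drop, ha1len]
          omega
        have ha1k : a1.drop k = [] := List.eq_nil_of_length_eq_zero hlen0
        have hk2 : 0 < k := by
          rcases Nat.eq_zero_or_pos k with h0 | h0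
          · rw [h0] at hrest; simp at hrest; exact absurd hrest hdsne
          · exact h0
        rw [ha1k, solutionGo_nil]
        simp [G, hk2]
      · -- remaining head e ≥ 2
        have he2 : 2 ≤ e := by
          have h1 : 1 ≤ e := hge1 e (List.mem_of_mem_drop (by rw [hrest]; simp))
          have hne1 : e ≠ 1 := by
            apply leadOne_drop ds
            rw [← hkone, hrest]; simp
          omega
        have hM2 : 2 ≤ M ds := by
          have := M_mem ds e (List.mem_of_mem_drop (by rw [hrest]; simp))
          omega
        -- apply IH to the popped state
        have hlen' : (a1.drop k).length ≤ (b.drop k).length := by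
          simp only [List.length_drop]; omega
        have hpos' : ∀ p ∈ (a1.drop k).zip (b.drop k), 0 < p.2 := by
          intro p hp
          rw [zip_drop] at hp
          have hp2 := List.mem_of_mem_drop hp
          rw [ha1, zip_zipWith_add] at hp2
          rcases List.mem_map.mp hp2 with ⟨q, hq, hqe⟩
          have := hpos q hq
          rw [← hqe]; exact this
        have hMlt : M (days (a1.drop k) (b.drop k)) < fuel := by
          rw [hdays']
          have hlt : M ((ds.drop k).map decD) < M ds := by
            apply M_lt _ _ (by omega)
            intro d hd
            rcases List.mem_map.mp hd with ⟨d0, hd0, hde⟩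
            have hd0m := List.mem_of_mem_drop hd0
            have h1 := hge1 d0 hd0m
            have h2 := M_mem ds d0 hd0m
            rw [← hde]
            unfold decD
            omega
          omega
        rw [ih _ _ _ hlen' hpos' hMlt]
        -- G of the decremented rest = G of the rest
        have hGdec : G ((ds.drop k).map decD) = G (ds.drop k) := by
          rw [hrest]
          simp only [List.map_cons, G]
          have : decD e = e - 1 := by unfold decD; omega
          rw [this]
          apply grp_dec _ _ _ he2
          intro d hd
          exact hge1 d (List.mem_of_mem_drop (by rw [hrest]; simp [hd]))
        rw [hdays', hGdec]
        rcases Nat.eq_zero_or_pos k with hk0 | hk0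
        · have hde : ds = e :: rest := by rw [← hrest, hk0, List.drop_zero]
          simp [hk0, hde]
        · simp [hk0, hrest, List.append_assoc]

-- bridge: B's fold is the pure grouping
theorem altGo_eq (ps : List (Int × Int)) : ∀ (g c : Int) (ans : List Int), 0 < c →
    altGo ps (some g) c ans = ans ++ grp g c (ps.map (fun p => altDay p.1 p.2)) := by
  induction ps with
  | nil => intro g c ans hc; simp [altGo, grp, hc.ne']
  | cons p ps ih =>
    intro g c ans hc
    rcases p with ⟨x, s⟩
    simp only [altGo, List.map_cons, grp]
    by_cases h : g < altDay x s
    · rw [if_pos (by simpa using h), if_pos h, if_pos hc.ne', ih _ _ _ (by omega)]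
      simp
    · rw [if_neg (by simpa using h), if_neg h, ih _ _ _ (by omega)]

theorem solution_alt_eq_G (a b : List Int) : solution_alt a b = G (days a b) := by
  unfold solution_alt days
  cases hz : a.zip b with
  | nil => simp [altGo, G]
  | cons p ps =>
    rcases p with ⟨x, s⟩
    simp only [altGo, List.map_cons, G]
    norm_num
    rw [altGo_eq ps (altDay x s) 1 [] (by omega)]
    simp

-- the fuel is sufficient: the largest day is below it
theorem M_days_le (a : List Int) : ∀ (b : List Int), (∀ p ∈ a.zip b, 0 < p.2) →
    M (days a b) ≤ a.length + (a.map (fun x => (100 - x).toNat)).sum := by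
  induction a with
  | nil => intro b _; simp [days, M]
  | cons x a ih =>
    intro b hpos
    cases b with
    | nil => simp [days, M]
    | cons s b =>
      have hs : 0 < s := hpos (x, s) (by simp)
      have h1 := altDay_bound x s hs
      have h2 := ih b (fun p hp => hpos p (by simp [hp]))
      simp only [days, List.zip_cons_cons, List.map_cons, M, List.length_cons, List.sum_cons]
      unfold days at h2
      omega

-- ===== VERDICT (by name: the statement is the Claim_ definition above) =====
theorem solution_spec : Claim_equal_solution := by
  intro a b _ hpre
  rcases hpre with ⟨hab, hpos⟩
  unfold Spec_solution solution
  rw [solutionGo_eq _ a b [] hab hpos (by have := M_days_le a b hpos; omega)]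
  rw [solution_alt_eq_G]
  simp
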